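-- pv_equiv track=rewrite | github.com/rotes328/AOC2023 | day13/day13.py | check_inflection
-- ===== SOURCE A (Python) =====
-- def check_inflection(arr, index):
--     i = 0
--     while index - i > 0 and index + i < len(arr):
--         if arr[index-i-1]==arr[index+i]:
--             i += 1
--             continue
--         else:
--             return False
--     return True
-- ===== SOURCE B (Python) =====
-- def check_inflection(arr, index):
--     n = min(index, len(arr) - index)
--     if n <= 0:
--         return True
--     return arr[index-n:index][::-1] == arr[index:index+n]
-- ===== Notes on version B (the rewrite author's own statement) =====
-- stated objective: simpler
-- what changed: Replaces the outward-expanding pairwise while-loop with a single clamp-to-overlap slice, reverse and structural comparison (no loop counter).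
import Mathlib
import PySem

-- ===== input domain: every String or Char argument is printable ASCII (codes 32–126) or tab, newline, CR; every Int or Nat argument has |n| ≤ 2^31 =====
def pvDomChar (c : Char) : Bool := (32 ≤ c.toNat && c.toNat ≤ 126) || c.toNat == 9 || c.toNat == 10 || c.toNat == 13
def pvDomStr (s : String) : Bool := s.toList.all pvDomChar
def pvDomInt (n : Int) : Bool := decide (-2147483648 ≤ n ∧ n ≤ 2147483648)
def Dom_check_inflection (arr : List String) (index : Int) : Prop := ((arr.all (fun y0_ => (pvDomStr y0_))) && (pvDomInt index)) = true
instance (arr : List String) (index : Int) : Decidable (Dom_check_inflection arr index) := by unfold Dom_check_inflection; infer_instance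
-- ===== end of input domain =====

-- B replaces A's outward-expanding pairwise while-loop with one slice-reverse-and-compare of the
-- overlap windows around the index (objective: simpler).

-- ===== PORT A =====
-- the while loop of A: state is the counter i
def checkLoopA (arr : List String) (index : Int) (i : Int) : Bool :=
  if _h : index - i > 0 ∧ index + i < (arr.length : Int) then
    if PySem.List.pyGet? arr (index - i - 1) == PySem.List.pyGet? arr (index + i) then
      checkLoopA arr index (i + 1)
    else false
  else true
termination_by (index - i).toNat
decreasing_by omega

def check_inflection (arr : List String) (index : Int) : Bool :=
  checkLoopA arr index 0

-- ===== PORT B =====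
def check_inflection_alt (arr : List String) (index : Int) : Bool :=
  let n := min index ((arr.length : Int) - index)
  if n ≤ 0 then true
  else (PySem.List.slice arr (some (index - n)) (some index)).reverse
         == PySem.List.slice arr (some index) (some (index + n))

-- ===== PRECONDITION & SPEC =====
def Spec_check_inflection (arr : List String) (index : Int) (out : Bool) : Prop := out = check_inflection_alt arr index
instance (arr : List String) (index : Int) (out : Bool) : Decidable (Spec_check_inflection arr index out) := by unfold Spec_check_inflection; infer_instance

-- ===== CLAIM (what is proved, stated in full; the proofs are below) =====
def Claim_equal_check_inflection : Prop := ∀ (arr : List String) (index : Int), Dom_check_inflection arr index → Spec_check_inflection arr index (check_inflection arr index)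

-- ===== LEMMAS AND PROOFS =====

-- A's loop from counter i returns true iff every remaining pair matches
theorem checkLoopA_char (arr : List String) (k m : Nat)
    (hm : m = min k (arr.length - k)) :
    ∀ d i : Nat, i + d = m →
      checkLoopA arr (k : Int) (i : Int)
        = decide (∀ j : Nat, i ≤ j → j < m → arr[k - 1 - j]? = arr[k + j]?) := by
  intro d
  induction d with
  | zero =>
      intro i hi
      rw [checkLoopA]
      have hcond : ¬ ((k : Int) - i > 0 ∧ (k : Int) + i < (arr.length : Int)) := by omega
      rw [dif_neg hcond]
      have hall : ∀ j : Nat, i ≤ j → j < m → arr[k - 1 - j]? = arr[k + j]? := by omega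
      exact (decide_eq_true hall).symm
  | succ d ih =>
      intro i hi
      rw [checkLoopA]
      have hik : i < k := by omega
      have hil : k + i < arr.length := by omega
      have hcond : ((k : Int) - i > 0 ∧ (k : Int) + i < (arr.length : Int)) := by
        constructor <;> [omega; (push_cast; omega)]
      rw [dif_pos hcond]
      have e1 : (k : Int) - i - 1 = ((k - i - 1 : Nat) : Int) := by omega
      have e2 : (k : Int) + i = ((k + i : Nat) : Int) := by omega
      rw [e1, e2, PySem.List.pyGet?_natCast, PySem.List.pyGet?_natCast]
      have e3 : k - i - 1 = k - 1 - i := by omega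
      by_cases heq : arr[k - 1 - i]? = arr[k + i]?
      · have ebeq : (arr[k - i - 1]? == arr[k + i]?) = true := by
          rw [e3]; exact beq_iff_eq.mpr heq
        rw [if_pos ebeq]
        have e4 : (k : Int) + (i : Int) + 1 = ((i + 1 : Nat) : Int) + k := by push_cast; ring
        have : (k : Int) + ((i : Int) + 1) = (((i + 1 : Nat) : Int)) + k := by push_cast; ring
        have hrec := ih (i + 1) (by omega)
        have ecast : ((i : Int) + 1) = ((i + 1 : Nat) : Int) := by push_cast; ring
        rw [ecast, hrec]
        simp only [decide_eq_decide]
        constructor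
        · intro h j hij hjm
          rcases Nat.eq_or_lt_of_le hij with rfl | hlt
          · exact heq
          · exact h j hlt hjm
        · intro h j hij hjm
          exact h j (by omega) hjm
      · have ebeq : (arr[k - i - 1]? == arr[k + i]?) = false := by
          rw [e3]; exact beq_eq_false_iff_ne.mpr heq
        rw [if_neg (by simp [ebeq])]
        have : ¬ (∀ j : Nat, i ≤ j → j < m → arr[k - 1 - j]? = arr[k + j]?) := by
          intro h; exact heq (h i le_rfl (by omega))
        simp [this]

-- B's slice comparison equals the same pointwise condition
theorem alt_char (arr : List String) (k m : Nat)
    (hm : m = min k (arr.length - k)) (hpos : 0 < m) :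
    check_inflection_alt arr (k : Int)
      = decide (∀ j : Nat, j < m → arr[k - 1 - j]? = arr[k + j]?) := by
  have hmk : m ≤ k := by omega
  have hml : k + m ≤ arr.length := by omega
  unfold check_inflection_alt
  have hn : min (k : Int) ((arr.length : Int) - k) = ((m : Nat) : Int) := by omega
  rw [hn]
  rw [if_neg (by omega)]
  have e1 : (k : Int) - (m : Int) = ((k - m : Nat) : Int) := by omega
  have e2 : (k : Int) = ((k : Nat) : Int) := rfl
  have e3 : (k : Int) + (m : Int) = ((k + m : Nat) : Int) := by push_cast; ring
  rw [e1, e3, PySem.List.slice_natCast, PySem.List.slice_natCast]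
  have et1 : k - (k - m) = m := by omega
  have et2 : k + m - k = m := by omega
  rw [et1, et2]
  have hlen1 : ((arr.drop (k - m)).take m).length = m := by
    simp; omega
  have hlen2 : ((arr.drop k).take m).length = m := by
    simp; omega
  rw [Bool.beq_eq_decide_eq]
  simp only [decide_eq_decide]
  constructor
  · intro h j hj
    have := congrArg (fun l => l[j]?) h
    simp only at this
    rw [List.getElem?_reverse (by omega)] at this
    rw [hlen1] at this
    rw [List.getElem?_take_of_lt (by omega), List.getElem?_take_of_lt hj] at this
    rw [List.getElem?_drop, List.getElem?_drop] at this
    have e : k - m + (m - 1 - j) = k - 1 - j := by omega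
    rwa [e] at this
  · intro h
    apply List.ext_getElem?
    intro j
    by_cases hj : j < m
    · rw [List.getElem?_reverse (by omega), hlen1]
      rw [List.getElem?_take_of_lt (by omega), List.getElem?_take_of_lt hj]
      rw [List.getElem?_drop, List.getElem?_drop]
      have e : k - m + (m - 1 - j) = k - 1 - j := by omega
      rw [e]; exact h j hj
    · rw [List.getElem?_eq_none, List.getElem?_eq_none]
      · omega
      · simp; omega

-- ===== VERDICT (by name: the statement is the Claim_ definition above) =====
theorem check_inflection_spec : Claim_equal_check_inflection := by
  intro arr index _
  unfold Spec_check_inflection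
  by_cases htriv : index ≤ 0 ∨ (arr.length : Int) ≤ index
  · -- overlap empty: both sides are true
    have ha : check_inflection arr index = true := by
      unfold check_inflection
      rw [checkLoopA]
      rw [dif_neg (by omega)]
    have hb : check_inflection_alt arr index = true := by
      unfold check_inflection_alt
      rw [if_pos (by omega)]
    rw [ha, hb]
  · push Not at htriv
    obtain ⟨h0, hl⟩ := htriv
    obtain ⟨k, rfl⟩ : ∃ k : Nat, index = (k : Int) := ⟨index.toNat, (Int.toNat_of_nonneg (by omega)).symm⟩
    set m := min k (arr.length - k) with hm
    have hpos : 0 < m := by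
      have : (k : Int) < arr.length := hl
      omega
    have hA := checkLoopA_char arr k m hm m 0 (by omega)
    have hB := alt_char arr k m hm hpos
    unfold check_inflection
    have e0 : ((0 : Nat) : Int) = (0 : Int) := rfl
    rw [← e0, hA, hB]
    simp only [decide_eq_decide]
    constructor
    · intro h j hj; exact h j (Nat.zero_le j) hj
    · intro h j _ hj; exact h j hj
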